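-- pv_equiv track=rewrite | github.com/kinged007/wordpress-db-explorer | src/search_replace.py | _fix_malformed_serialized_data
-- ===== SOURCE A (Python) =====
-- def _fix_malformed_serialized_data(serialized_data: str) -> str:
--     """
--     Attempt to fix common issues in malformed PHP serialized data,
--     particularly incorrect string lengths.
--     """
--     result = []
--     i = 0
--
--     while i < len(serialized_data):
--         # Look for string pattern s:length:"
--         if i + 1 < len(serialized_data) and serialized_data[i:i+2] == 's:':
--             # Find the length part
--             length_start = i + 2
--             length_end = serialized_data.find(':', length_start)
--
--             if length_end == -1:
--                 # Not a valid string pattern, just copy the character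
--                 result.append(serialized_data[i])
--                 i += 1
--                 continue
--
--             try:
--                 declared_length = int(serialized_data[length_start:length_end])
--             except ValueError:
--                 # Not a valid length, just copy the character
--                 result.append(serialized_data[i])
--                 i += 1
--                 continue
--
--             # Check if this is followed by a quote
--             quote_pos = length_end + 1
--             if quote_pos >= len(serialized_data) or serialized_data[quote_pos] != '"':
--                 # Not a string pattern, just copy the character
--                 result.append(serialized_data[i])
--                 i += 1
--                 continue
--
--             # Find the actual end of the string by looking for "; pattern
--             content_start = quote_pos + 1
--             quote_semicolon_pos = serialized_data.find('";', content_start)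
--
--             if quote_semicolon_pos == -1:
--                 # Can't find the end, just copy what we have
--                 result.append(serialized_data[i])
--                 i += 1
--                 continue
--
--             # Extract the actual content
--             actual_content = serialized_data[content_start:quote_semicolon_pos]
--             actual_length = len(actual_content)
--
--             # Rebuild the string with correct length
--             result.append(f's:{actual_length}:"{actual_content}";')
--
--             # Move past this entire string
--             i = quote_semicolon_pos + 2  # +2 for the "; at the end
--         else:
--             # Not a string pattern, just copy the character
--             result.append(serialized_data[i])
--             i += 1
--
--     return ''.join(result)
-- ===== SOURCE B (Python) =====
-- # B: instead of scanning character by character, jump straight between candidate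
-- # "s:" occurrences with str.find and copy the text between them wholesale.
--
-- def _try_fix(t: str):
--     """Given the text after an 's:' marker, return (fixed_piece, remainder)
--     if a full s:<int>:"..."; pattern starts there, else (None, None)."""
--     le = t.find(':')
--     if le == -1:
--         return None, None
--     try:
--         int(t[:le])
--     except ValueError:
--         return None, None
--     if t[le + 1:le + 2] != '"':
--         return None, None
--     q = t.find('";', le + 2)
--     if q == -1:
--         return None, None
--     content = t[le + 2:q]
--     return 's:%d:"%s";' % (len(content), content), t[q + 2:]
--
--
-- def _fix_malformed_serialized_data(serialized_data: str) -> str: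
--     out = []
--     rest = serialized_data
--     while True:
--         j = rest.find('s:')
--         if j == -1:
--             out.append(rest)
--             return ''.join(out)
--         out.append(rest[:j])
--         piece, rem = _try_fix(rest[j + 2:])
--         if piece is None:
--             out.append('s')
--             rest = rest[j + 1:]
--         else:
--             out.append(piece)
--             rest = rem
-- ===== Notes on version B (the rewrite author's own statement) =====
-- stated objective: faster
-- what changed: B replaces A's character-by-character scan with str.find-driven jumps between 's:' candidates, copying the text between candidates wholesale instead of appending one character at a time.
import Mathlib
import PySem

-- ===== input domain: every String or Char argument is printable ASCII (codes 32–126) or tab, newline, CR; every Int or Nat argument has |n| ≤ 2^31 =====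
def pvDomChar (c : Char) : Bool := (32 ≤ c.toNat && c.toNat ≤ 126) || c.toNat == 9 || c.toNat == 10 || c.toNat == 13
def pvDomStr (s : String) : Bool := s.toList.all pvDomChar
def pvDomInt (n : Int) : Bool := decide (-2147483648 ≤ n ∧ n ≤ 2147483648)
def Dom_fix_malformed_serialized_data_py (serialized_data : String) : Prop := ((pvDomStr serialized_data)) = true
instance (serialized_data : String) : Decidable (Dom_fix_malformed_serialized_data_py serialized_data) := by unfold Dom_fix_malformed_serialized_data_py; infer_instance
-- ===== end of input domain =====

-- B replaces A's character-by-character scan by find-driven jumps between 's:'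
-- candidates, copying the text in between in one chunk (objective: faster, constant-factor).

-- ===== PORT A =====
-- A's while loop, written as the structural recursion on the unread suffix of the
-- input (A's absolute positions i, length_end, quote_semicolon_pos become the
-- corresponding relative positions in the suffix; all of A's searches look only
-- forward of i, so the values are the same).
def pyScanA : List Char → List Char
  | 's' :: ':' :: t =>
    -- serialized_data[i:i+2] == 's:'
    let le := PySem.Chars.find t [':']          -- length_end (relative to t; -1 if absent)
    if le = -1 then 's' :: pyScanA (':' :: t)
    else
      match PySem.Int.ofChars? (t.take le.toNat) with   -- int(...) ; ValueError → none
      | none => 's' :: pyScanA (':' :: t)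
      | some _ =>
        if t[le.toNat + 1]? = some '"' then             -- quote_pos bounds check + == '"'
          let q := PySem.Chars.findFrom t ['"', ';'] (le + 2) none   -- find('";', content_start)
          if q = -1 then 's' :: pyScanA (':' :: t)
          else
            let content := (t.drop (le.toNat + 2)).take (q.toNat - (le.toNat + 2))
            ['s', ':'] ++ PySem.Int.toChars (content.length : Int) ++ [':', '"'] ++ content
              ++ ['"', ';'] ++ pyScanA (t.drop (q.toNat + 2))
        else 's' :: pyScanA (':' :: t)
  | c :: cs => c :: pyScanA cs
  | [] => []
termination_by l => l.length
decreasing_by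
  all_goals simp
  all_goals omega

def fix_malformed_serialized_data_py (serialized_data : String) : String :=
  String.ofList (pyScanA serialized_data.toList)

-- ===== PORT B =====
-- _try_fix: given the text after an 's:' marker, the fixed piece and the remainder,
-- or none if no full pattern starts there.
def tryFixB (t : List Char) : Option (List Char × List Char) :=
  let le := PySem.Chars.find t [':']
  if le = -1 then none
  else
    match PySem.Int.ofChars? (t.take le.toNat) with
    | none => none
    | some _ =>
      if (t.drop (le.toNat + 1)).take 1 = ['"'] then     -- t[le+1:le+2] == '"'
        let q := PySem.Chars.findFrom t ['"', ';'] (le + 2) none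
        if q = -1 then none
        else
          let content := (t.drop (le.toNat + 2)).take (q.toNat - (le.toNat + 2))
          some (['s', ':'] ++ PySem.Int.toChars (content.length : Int) ++ [':', '"'] ++ content
                  ++ ['"', ';'], t.drop (q.toNat + 2))
      else none

lemma tryFixB_length {t p r : List Char} (h : tryFixB t = some (p, r)) : r.length ≤ t.length := by
  unfold tryFixB at h
  simp only at h
  split at h
  · exact absurd h (by simp)
  · split at h
    · exact absurd h (by simp)
    · split at h
      · split at h
        · exact absurd h (by simp)
        · simp only [Option.some.injEq, Prod.mk.injEq] at h
          rw [← h.2]; simp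
      · exact absurd h (by simp)

-- the while loop of B, as recursion on the unprocessed suffix
def pyScanB (l : List Char) : List Char :=
  let j := PySem.Chars.find l ['s', ':']
  if hj : j = -1 then l
  else
    match htf : tryFixB (l.drop (j.toNat + 2)) with
    | some (piece, rem) => l.take j.toNat ++ piece ++ pyScanB rem
    | none => l.take j.toNat ++ 's' :: pyScanB (l.drop (j.toNat + 1))
termination_by l.length
decreasing_by
  · have hj' : PySem.Chars.find l ['s', ':'] = j := rfl
    have hj0 : (0:Int) ≤ PySem.Chars.find l ['s', ':'] := by
      have := PySem.Chars.neg_one_le_find (s := l) (sub := ['s', ':']); rw [hj']; omega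
    have hpre := (PySem.Chars.find_spec hj0).1
    have hlen : (PySem.Chars.find l ['s', ':']).toNat + 2 ≤ l.length := by
      have h1 := hpre.length_le; simp at h1; omega
    rw [hj'] at hlen
    have h2 := tryFixB_length htf
    have h3 := List.length_drop (l := l) (i := j.toNat + 2)
    rw [h3] at h2
    omega
  · have hj' : PySem.Chars.find l ['s', ':'] = j := rfl
    have hj0 : (0:Int) ≤ PySem.Chars.find l ['s', ':'] := by
      have := PySem.Chars.neg_one_le_find (s := l) (sub := ['s', ':']); rw [hj']; omega
    have hpre := (PySem.Chars.find_spec hj0).1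
    have hlen : (PySem.Chars.find l ['s', ':']).toNat + 2 ≤ l.length := by
      have h1 := hpre.length_le; simp at h1; omega
    rw [hj'] at hlen
    simp; omega

def fix_malformed_serialized_data_py_alt (serialized_data : String) : String :=
  String.ofList (pyScanB serialized_data.toList)

-- ===== PRECONDITION & SPEC =====
def Spec_fix_malformed_serialized_data_py (serialized_data : String) (out : String) : Prop := out = fix_malformed_serialized_data_py_alt serialized_data
instance (serialized_data : String) (out : String) : Decidable (Spec_fix_malformed_serialized_data_py serialized_data out) := by unfold Spec_fix_malformed_serialized_data_py; infer_instance

-- ===== CLAIM (what is proved, stated in full; the proofs are below) =====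
def Claim_equal_fix_malformed_serialized_data_py : Prop := ∀ (serialized_data : String), Dom_fix_malformed_serialized_data_py serialized_data → Spec_fix_malformed_serialized_data_py serialized_data (fix_malformed_serialized_data_py serialized_data)

-- ===== LEMMAS AND PROOFS =====

lemma take1_drop (t : List Char) (k : Nat) (x : Char) :
    ((t.drop k).take 1 = [x]) ↔ t[k]? = some x := by
  rw [show t[k]? = (t.drop k)[0]? by simp]
  cases t.drop k <;> simp

lemma pyScanA_cons_ne (c : Char) (cs : List Char) (h : ¬ ['s', ':'] <+: (c :: cs)) :
    pyScanA (c :: cs) = c :: pyScanA cs := by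
  rw [pyScanA.eq_def]
  split
  · rename_i t heq
    injection heq with h1 h2
    subst h1; subst h2
    exact absurd (by simp [List.prefix_cons_iff]) h
  · rename_i c' cs' heq
    injection heq with h1 h2
    subst h1; subst h2
    rfl
  · rename_i heq; exact absurd heq (by simp)

lemma pyScanA_copy (n : Nat) : ∀ (l : List Char), (∀ i, i < n → ¬ ['s', ':'] <+: l.drop i) →
    pyScanA l = l.take n ++ pyScanA (l.drop n) := by
  induction n with
  | zero => simp
  | succ m ih =>
    intro l h
    match l with
    | [] => simp
    | c :: cs =>
      rw [pyScanA_cons_ne c cs (by simpa using h 0 (by omega))]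
      rw [ih cs (fun i hi => by simpa using h (i+1) (by omega))]
      simp

lemma pyScanA_pattern (t : List Char) :
    pyScanA ('s' :: ':' :: t) =
      match tryFixB t with
      | some (p, r) => p ++ pyScanA r
      | none => 's' :: pyScanA (':' :: t) := by
  rw [pyScanA]
  unfold tryFixB
  simp only
  split
  · rfl
  · split
    · rfl
    · by_cases hq : t[(PySem.Chars.find t [':']).toNat + 1]? = some '"'
      · rw [if_pos hq, if_pos ((take1_drop t ((PySem.Chars.find t [':']).toNat + 1) '"').mpr hq)]
        by_cases hq2 : PySem.Chars.findFrom t ['"', ';'] (PySem.Chars.find t [':'] + 2) none = -1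
        · rw [if_pos hq2, if_pos hq2]
        · rw [if_neg hq2, if_neg hq2]
      · rw [if_neg hq, if_neg (fun hc => hq ((take1_drop t ((PySem.Chars.find t [':']).toNat + 1) '"').mp hc))]

lemma drop_pattern {l : List Char} {j : Nat} (h : ['s', ':'] <+: l.drop j) :
    l.drop j = 's' :: ':' :: l.drop (j + 2) := by
  obtain ⟨u, hu⟩ := h
  have h2 : l.drop (j + 2) = (l.drop j).drop 2 := by rw [List.drop_drop]
  rw [h2, ← hu]
  rfl

lemma no_pattern_of_find_neg {l : List Char} (h : PySem.Chars.find l ['s', ':'] = -1) :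
    ∀ i, ¬ ['s', ':'] <+: l.drop i := by
  intro i hi
  have h1 : PySem.Chars.isIn ['s', ':'] l = true := (PySem.Chars.exists_prefix_drop_iff_isIn _ _).mp ⟨i, hi⟩
  have h2 := (PySem.Chars.find_eq_neg_one_iff _ _).mp h
  exact h2 ((PySem.Chars.isIn_iff_infix _ _).mp h1)

lemma pyScanA_pattern_some {t p r : List Char} (h : tryFixB t = some (p, r)) :
    pyScanA ('s' :: ':' :: t) = p ++ pyScanA r := by
  rw [pyScanA_pattern, h]

lemma pyScanA_pattern_none {t : List Char} (h : tryFixB t = none) :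
    pyScanA ('s' :: ':' :: t) = 's' :: pyScanA (':' :: t) := by
  rw [pyScanA_pattern, h]

theorem pyScan_eq (l : List Char) : pyScanA l = pyScanB l := by
  induction l using pyScanB.induct with
  | case1 l j hj =>
    rw [pyScanB]
    rw [dif_pos hj]
    have hno := no_pattern_of_find_neg hj
    rw [pyScanA_copy l.length l (fun i _ => hno i)]
    simp [pyScanA]
  | case2 l j hj piece rem htf ih =>
    have hj0 : (0:Int) ≤ PySem.Chars.find l ['s', ':'] := by
      have := PySem.Chars.neg_one_le_find (s := l) (sub := ['s', ':']); omega
    have hspec := PySem.Chars.find_spec hj0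
    rw [pyScanA_copy (PySem.Chars.find l ['s', ':']).toNat l (fun i hi => hspec.2 i hi)]
    rw [drop_pattern hspec.1]
    rw [pyScanA_pattern_some htf]
    conv_rhs => rw [pyScanB]
    rw [dif_neg hj, htf]
    simp [ih, List.append_assoc]
  | case3 l j hj htf ih =>
    have hj0 : (0:Int) ≤ PySem.Chars.find l ['s', ':'] := by
      have := PySem.Chars.neg_one_le_find (s := l) (sub := ['s', ':']); omega
    have hspec := PySem.Chars.find_spec hj0
    rw [pyScanA_copy (PySem.Chars.find l ['s', ':']).toNat l (fun i hi => hspec.2 i hi)]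
    rw [drop_pattern hspec.1]
    rw [pyScanA_pattern_none htf]
    have hdrop1 : ':' :: l.drop ((PySem.Chars.find l ['s', ':']).toNat + 2) = l.drop ((PySem.Chars.find l ['s', ':']).toNat + 1) := by
      have h1 := drop_pattern hspec.1
      have h2 : l.drop ((PySem.Chars.find l ['s', ':']).toNat + 1) = (l.drop (PySem.Chars.find l ['s', ':']).toNat).drop 1 := by rw [List.drop_drop]
      rw [h2, h1]
      rfl
    rw [hdrop1, ih]
    conv_rhs => rw [pyScanB]
    rw [dif_neg hj, htf]

-- ===== VERDICT (by name: the statement is the Claim_ definition above) =====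
theorem fix_malformed_serialized_data_py_spec : Claim_equal_fix_malformed_serialized_data_py := by
  intro s _
  unfold Spec_fix_malformed_serialized_data_py fix_malformed_serialized_data_py fix_malformed_serialized_data_py_alt
  rw [pyScan_eq]
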